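-- pv_equiv track=rewrite | github.com/SrinivasSurisetti/GFG | Difficulty: Medium/Group Balls by Sequence/group-balls-by-sequence.py | validgroup
-- ===== SOURCE A (Python) =====
-- from collections import Counter
--
-- def validgroup(arr ,k):
--     # Code here
--     if len(arr)%k != 0:
--         return False
--     arr.sort()
--     count = Counter(arr)
--     for num in arr:
--         if count[num] == 0:
--             continue
--         for i in range(num,num+k):
--             if count[i] == 0:
--                 return False
--             count[i] -= 1
--     return True
-- ===== SOURCE B (Python) =====
-- from collections import deque
--
-- def validgroup(arr, k):
--     # One left-to-right pass over the value runs of the sorted array, carrying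
--     # "open group" obligations instead of consuming k-windows from a Counter.
--     if len(arr) % k != 0:
--         return False
--     arr.sort()
--     runs = []                      # run-length encoding of the sorted array
--     for v in arr:
--         if runs and runs[-1][0] == v:
--             runs[-1] = (v, runs[-1][1] + 1)
--         else:
--             runs.append((v, 1))
--     open_cnt = 0                   # groups currently open (each expects the next value)
--     prev = 0
--     starts = deque()               # (value, groups freshly started at that value) in the window
--     for (v, c) in runs:
--         if open_cnt > 0:
--             if v != prev + 1 or c < open_cnt:
--                 return False
--         else:
--             starts.clear()
--         starts.append((v, c - open_cnt))
--         open_cnt = c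
--         if starts[0][0] == v - k + 1:
--             open_cnt -= starts.popleft()[1]
--         prev = v
--     return open_cnt == 0
-- ===== Notes on version B (the rewrite author's own statement) =====
-- stated objective: alternative
-- what changed: Replaces A's Counter-based greedy (for every array element, consume a whole k-window forward by decrementing k counts) with a single left-to-right pass over the run-length-encoded sorted array that carries open-group obligations in a deque of recent start counts, checking each value against the groups currently open.
-- outside the precondition, e.g. on validgroup([1, 1, 1, 1], -2): A returns True, B returns False; on validgroup([1], 0): A raises ZeroDivisionError, B raises ZeroDivisionError
import Mathlib
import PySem

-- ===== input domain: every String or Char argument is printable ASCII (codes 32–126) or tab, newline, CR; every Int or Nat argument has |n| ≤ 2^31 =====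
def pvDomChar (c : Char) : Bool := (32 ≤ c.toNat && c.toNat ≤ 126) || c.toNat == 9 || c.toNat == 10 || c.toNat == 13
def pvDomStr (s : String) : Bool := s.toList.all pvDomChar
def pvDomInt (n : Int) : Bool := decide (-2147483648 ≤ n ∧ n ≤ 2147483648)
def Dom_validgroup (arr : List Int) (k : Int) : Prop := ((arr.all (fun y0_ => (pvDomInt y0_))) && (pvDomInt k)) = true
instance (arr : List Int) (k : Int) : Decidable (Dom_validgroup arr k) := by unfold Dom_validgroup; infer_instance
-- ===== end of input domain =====

-- B replaces A's Counter greedy (consume a k-window forward from each element) by one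
-- left-to-right pass over the runs of the sorted array carrying open-group obligations;
-- equivalence is about the RETURN value (both Pythons sort arr in place the same way).

-- ===== PORT A =====
-- inner 'for i in range(num, num+k): if count[i]==0: return False; count[i]-=1'
def vgInner : List Int → PySem.Dict Int Int → Option (PySem.Dict Int Int)
  | [], d => some d
  | i :: rest, d =>
    if d.getD i 0 == 0 then none
    else vgInner rest (d.modify i 0 (· - 1))

-- outer 'for num in arr: if count[num]==0: continue; <inner>'
def vgOuter (k : Int) : List Int → PySem.Dict Int Int → Bool
  | [], _ => true
  | num :: rest, d =>
    if d.getD num 0 == 0 then vgOuter k rest d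
    else
      match vgInner (PySem.List.pyRange num (num + k)) d with
      | none => false
      | some d' => vgOuter k rest d'

def validgroup (arr : List Int) (k : Int) : Bool :=
  if PySem.Int.mod (arr.length : Int) k ≠ 0 then false
  else
    let s := PySem.List.sorted arr (fun x => x)
    vgOuter k s (PySem.Dict.counter s)

-- ===== PORT B =====
-- run-length encoding loop: 'if runs and runs[-1][0] == v: runs[-1] = (v, c+1) else: runs.append((v,1))'
def bStep (runs : List (Int × Int)) (v : Int) : List (Int × Int) :=
  match runs.getLast? with
  | some (u, c) => if u == v then runs.dropLast ++ [(v, c + 1)] else runs ++ [(v, 1)]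
  | none => [(v, 1)]

def bRuns (arr : List Int) : List (Int × Int) := arr.foldl bStep []

-- the obligation pass: open group count, previous value, deque of (value, freshly started)
def bLoop (k : Int) : List (Int × Int) → Int → Int → List (Int × Int) → Bool
  | [], openc, _prev, _starts => openc == 0
  | (v, c) :: rest, openc, prev, starts =>
    if 0 < openc ∧ (v ≠ prev + 1 ∨ c < openc) then false
    else
      match (if 0 < openc then starts else []) ++ [(v, c - openc)] with
      | (u, g) :: t =>
        if u = v - k + 1 then bLoop k rest (c - g) v t
        else bLoop k rest c v ((u, g) :: t)
      | [] => bLoop k rest c v []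

def validgroup_alt (arr : List Int) (k : Int) : Bool :=
  if PySem.Int.mod (arr.length : Int) k ≠ 0 then false
  else bLoop k (bRuns (PySem.List.sorted arr (fun x => x))) 0 0 []

-- ===== PRECONDITION & SPEC =====
-- Pre_ restricts to the natural domain of a group size, k ≥ 1: at k = 0 A raises
-- ZeroDivisionError (len(arr)%k), and for k < 0 grouping into runs of negative length is
-- unspecified — A's inner range(num, num+k) is empty there, so A answers True whenever k
-- divides len(arr), while B's obligation pass answers False on any nonempty input.
def Pre_validgroup (arr : List Int) (k : Int) : Prop := 1 ≤ k
instance (arr : List Int) (k : Int) : Decidable (Pre_validgroup arr k) := by unfold Pre_validgroup; infer_instance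
def pvWitness_validgroup : List Int × Int := ([3, 1, 2, 7, 8, 6], 3)

def Spec_validgroup (arr : List Int) (k : Int) (out : Bool) : Prop := out = validgroup_alt arr k
instance (arr : List Int) (k : Int) (out : Bool) : Decidable (Spec_validgroup arr k out) := by unfold Spec_validgroup; infer_instance

-- ===== CLAIM (what is proved, stated in full; the proofs are below) =====
def Claim_equal_validgroup : Prop := ∀ (arr : List Int) (k : Int), Dom_validgroup arr k → Pre_validgroup arr k → Spec_validgroup arr k (validgroup arr k)

-- ===== LEMMAS AND PROOFS =====

-- ---- abstract A layer: the same loops on a count function instead of a PySem.Dict ----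
def pvConsume : List Int → (Int → Int) → Option (Int → Int)
  | [], f => some f
  | i :: rest, f => if f i = 0 then none else pvConsume rest (Function.update f i (f i - 1))

def pvALoop (k : Int) : List Int → (Int → Int) → Bool
  | [], _ => true
  | num :: rest, f =>
    if f num = 0 then pvALoop k rest f
    else
      match pvConsume (PySem.List.pyRange num (num + k)) f with
      | none => false
      | some f' => pvALoop k rest f'

-- ---- run-length encoding, structurally ----
def pvMerge (v : Int) : List (Int × Int) → List (Int × Int)
  | (u, c) :: t => if v = u then (v, c + 1) :: t else (v, 1) :: (u, c) :: t
  | [] => [(v, 1)]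

def pvChunks : List Int → List (Int × Int)
  | [] => []
  | v :: rest => pvMerge v (pvChunks rest)

def pvCat (acc cl : List (Int × Int)) : List (Int × Int) :=
  match acc.getLast?, cl with
  | some (u, c), (v, d) :: t => if u = v then acc.dropLast ++ (v, c + d) :: t else acc ++ cl
  | _, _ => acc ++ cl

def pvM : List (Int × Int) → Int → Int
  | [], _ => 0
  | q :: t, w => (if w = q.1 then q.2 else 0) + pvM t w

def pvFlat (cs : List (Int × Int)) : List Int := cs.flatMap (fun q => List.replicate q.2.toNat q.1)

def pvCover (k : Int) (starts : List (Int × Int)) (w : Int) : Int :=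
  (starts.map (fun q => if w < q.1 + k then q.2 else 0)).sum

-- invariant tying A's count function to B's obligation state (p = last processed value)
def pvInv (k : Int) (f : Int → Int) (openc p : Int) (starts cs : List (Int × Int)) : Prop :=
  (∀ w, p < w → f w = pvM cs w - pvCover k starts w) ∧
  (∀ w, p < w → 0 ≤ f w) ∧
  (∀ q ∈ starts, 0 ≤ q.2 ∧ q.1 ≤ p ∧ p + 1 < q.1 + k) ∧
  openc = (starts.map (·.2)).sum ∧
  starts.Pairwise (fun a b => a.1 < b.1) ∧
  (∀ q ∈ cs, p < q.1 ∧ 1 ≤ q.2) ∧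
  cs.Pairwise (fun a b => a.1 < b.1)

theorem pvM_eq_zero (cs : List (Int × Int)) (w : Int) (h : ∀ q ∈ cs, q.1 ≠ w) : pvM cs w = 0 := by
  induction cs with
  | nil => rfl
  | cons q t ih =>
    have hq := h q (by simp)
    have ht : ∀ q ∈ t, q.1 ≠ w := fun q hq => h q (List.mem_cons_of_mem _ hq)
    simp [pvM, Ne.symm hq, ih ht]

theorem pvM_ne_zero (cs : List (Int × Int)) (w : Int) (h : pvM cs w ≠ 0) : ∃ q ∈ cs, q.1 = w := by
  induction cs with
  | nil => simp [pvM] at h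
  | cons q t ih =>
    by_cases hw : w = q.1
    · exact ⟨q, by simp, hw.symm⟩
    · simp only [pvM, if_neg hw, zero_add] at h
      obtain ⟨q', hq', he⟩ := ih h
      exact ⟨q', by simp [hq'], he⟩

theorem pvSum_nonneg (starts : List (Int × Int)) (h : ∀ q ∈ starts, 0 ≤ q.2) :
    0 ≤ (starts.map (·.2)).sum := by
  apply List.sum_nonneg; intro x hx
  obtain ⟨q, hq, rfl⟩ := List.mem_map.mp hx
  exact h q hq

theorem pvCover_le (k : Int) (starts : List (Int × Int)) (w : Int)
    (h : ∀ q ∈ starts, 0 ≤ q.2) : pvCover k starts w ≤ (starts.map (·.2)).sum := by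
  induction starts with
  | nil => simp [pvCover]
  | cons q t ih =>
    have ht := ih (fun q hq => h q (List.mem_cons_of_mem _ hq))
    have hq := h q (by simp)
    simp only [pvCover, List.map_cons, List.sum_cons] at *
    have : (if w < q.1 + k then q.2 else 0) ≤ q.2 := by split <;> simp [hq]
    omega

theorem pvCover_nonneg (k : Int) (starts : List (Int × Int)) (w : Int)
    (h : ∀ q ∈ starts, 0 ≤ q.2) : 0 ≤ pvCover k starts w := by
  induction starts with
  | nil => simp [pvCover]
  | cons q t ih =>
    have ht := ih (fun q hq => h q (List.mem_cons_of_mem _ hq))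
    have hq := h q (by simp)
    simp only [pvCover, List.map_cons, List.sum_cons] at *
    have : (0:Int) ≤ (if w < q.1 + k then q.2 else 0) := by split <;> simp [hq]
    omega

theorem pvConsume_eq (is : List Int) (hnd : is.Nodup) (f : Int → Int) :
    pvConsume is f = if ∃ w ∈ is, f w = 0 then none
                     else some (fun w => if w ∈ is then f w - 1 else f w) := by
  induction is generalizing f with
  | nil => simp [pvConsume]
  | cons i rest ih =>
    rcases List.nodup_cons.mp hnd with ⟨hni, hnd'⟩
    by_cases hi : f i = 0
    · simp only [pvConsume, if_pos hi]
      rw [if_pos ⟨i, by simp, hi⟩]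
    · rw [pvConsume, if_neg hi, ih hnd']
      have hupd : ∀ w ∈ rest, Function.update f i (f i - 1) w = f w := by
        intro w hw
        have : w ≠ i := fun he => hni (he ▸ hw)
        simp [Function.update_apply, this]
      have hex : (∃ w ∈ rest, Function.update f i (f i - 1) w = 0) ↔ (∃ w ∈ i :: rest, f w = 0) := by
        constructor
        · rintro ⟨w, hw, h0⟩; exact ⟨w, List.mem_cons_of_mem _ hw, (hupd w hw) ▸ h0⟩
        · rintro ⟨w, hw, h0⟩
          rcases List.mem_cons.mp hw with rfl | hw'
          · exact absurd h0 hi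
          · exact ⟨w, hw', (hupd w hw').symm ▸ h0⟩
      by_cases hx : ∃ w ∈ i :: rest, f w = 0
      · rw [if_pos (hex.mpr hx), if_pos hx]
      · rw [if_neg (fun h => hx (hex.mp h)), if_neg hx]
        congr 1
        funext w
        by_cases hw : w ∈ rest
        · have hwi : w ≠ i := fun he => hni (he ▸ hw)
          simp [hw, List.mem_cons, hwi, hupd w hw]
        · by_cases hwi : w = i
          · subst hwi
            simp [hw, Function.update_apply]
          · simp [hw, hwi, Function.update_apply]

theorem vgInner_eq (is : List Int) (d : PySem.Dict Int Int) :
    (vgInner is d).map (fun d' w => d'.getD w 0) = pvConsume is (fun w => d.getD w 0) := by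
  induction is generalizing d with
  | nil => simp [vgInner, pvConsume]
  | cons i rest ih =>
    by_cases hi : d.getD i 0 = 0
    · simp [vgInner, pvConsume, hi]
    · rw [vgInner, pvConsume]
      simp only [beq_iff_eq, if_neg hi]
      rw [ih]
      congr 1
      funext w
      rw [PySem.Dict.getD_modify]
      simp [Function.update_apply]

theorem vgOuter_eq (k : Int) (nums : List Int) (d : PySem.Dict Int Int) :
    vgOuter k nums d = pvALoop k nums (fun w => d.getD w 0) := by
  induction nums generalizing d with
  | nil => rfl
  | cons num rest ih =>
    by_cases h0 : d.getD num 0 = 0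
    · simp [vgOuter, pvALoop, h0, ih]
    · rw [vgOuter, pvALoop]
      simp only [beq_iff_eq, if_neg h0]
      have := vgInner_eq (PySem.List.pyRange num (num + k)) d
      cases hv : vgInner (PySem.List.pyRange num (num + k)) d with
      | none => rw [hv] at this; simp only [Option.map_none] at this; rw [← this]
      | some d' =>
        rw [hv] at this; simp only [Option.map_some] at this; rw [← this]
        simp [ih]

theorem pvBlock (k v : Int) (hk : 1 ≤ k) (c : Nat) (f : Int → Int) (tail : List Int)
    (h0 : ∀ w ∈ PySem.List.pyRange v (v + k), 0 ≤ f w) (hfv : f v ≤ (c : Int)) :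
    pvALoop k (List.replicate c v ++ tail) f =
      if ∃ w ∈ PySem.List.pyRange v (v + k), f w < f v then false
      else pvALoop k tail (fun w => if w ∈ PySem.List.pyRange v (v + k) then f w - f v else f w) := by
  have hvmem : v ∈ PySem.List.pyRange v (v + k) := PySem.List.mem_pyRange_one.mpr ⟨le_refl v, by omega⟩
  induction c generalizing f with
  | zero =>
    have hv0 : f v = 0 := le_antisymm (by exact_mod_cast hfv) (h0 v hvmem)
    have hnex : ¬ ∃ w ∈ PySem.List.pyRange v (v + k), f w < f v := by
      rintro ⟨w, hw, hlt⟩; have := h0 w hw; omega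
    rw [if_neg hnex]
    simp only [List.replicate, List.nil_append]
    congr 1
    funext w
    split <;> simp [hv0]
  | succ c ih =>
    rw [List.replicate_succ, List.cons_append, pvALoop]
    by_cases hv0 : f v = 0
    · rw [if_pos hv0, ih f h0 (by omega)]
    · rw [if_neg hv0]
      rw [pvConsume_eq _ (PySem.List.nodup_pyRange_one v (v + k)) f]
      by_cases hz : ∃ w ∈ PySem.List.pyRange v (v + k), f w = 0
      · rw [if_pos hz]
        obtain ⟨w, hw, hw0⟩ := hz
        have : f w < f v := by
          have := h0 v hvmem; omega
        rw [if_pos ⟨w, hw, this⟩]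
      · rw [if_neg hz]
        set f1 : Int → Int := fun w => if w ∈ PySem.List.pyRange v (v + k) then f w - 1 else f w with hf1
        have h01 : ∀ w ∈ PySem.List.pyRange v (v + k), 0 ≤ f1 w := by
          intro w hw
          have h1 : f w ≠ 0 := fun h => hz ⟨w, hw, h⟩
          have := h0 w hw
          simp only [hf1, if_pos hw]; omega
        have hfv1 : f1 v ≤ (c : Int) := by
          simp only [hf1, if_pos hvmem]; push_cast at hfv ⊢; omega
        simp only [Option.some.injEq]
        rw [ih f1 h01 hfv1]
        have hcond : (∃ w ∈ PySem.List.pyRange v (v + k), f1 w < f1 v) ↔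
            (∃ w ∈ PySem.List.pyRange v (v + k), f w < f v) := by
          constructor
          · rintro ⟨w, hw, hlt⟩
            refine ⟨w, hw, ?_⟩
            simp only [hf1, if_pos hw, if_pos hvmem] at hlt; omega
          · rintro ⟨w, hw, hlt⟩
            refine ⟨w, hw, ?_⟩
            simp only [hf1, if_pos hw, if_pos hvmem]; omega
        by_cases hc : ∃ w ∈ PySem.List.pyRange v (v + k), f w < f v
        · rw [if_pos (hcond.mpr hc), if_pos hc]
        · rw [if_neg (fun h => hc (hcond.mp h)), if_neg hc]
          congr 1
          funext w
          by_cases hw : w ∈ PySem.List.pyRange v (v + k) <;>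
            simp only [hf1, if_pos hvmem, hw, if_pos, if_neg, ite_true, ite_false] <;> ring

theorem pvCat_bStep (acc : List (Int × Int)) (v : Int) (cl : List (Int × Int)) :
    pvCat (bStep acc v) cl = pvCat acc (pvMerge v cl) := by
  rcases List.eq_nil_or_concat acc with rfl | ⟨a', ⟨u, c⟩, rfl⟩
  · -- acc = []
    cases cl with
    | nil => simp [bStep, pvCat, pvMerge]
    | cons q t =>
      obtain ⟨w, d⟩ := q
      by_cases hvw : v = w <;>
        simp [bStep, pvCat, pvMerge, hvw] <;> ring_nf <;> simp [pvCat]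
  · -- acc = a' ++ [(u,c)]
    by_cases huv : u = v
    · subst huv
      cases cl with
      | nil => simp [bStep, pvCat, pvMerge, List.getLast?_concat, List.dropLast_concat]
      | cons q t =>
        obtain ⟨w, d⟩ := q
        by_cases hvw : u = w
        · subst hvw
          simp [bStep, pvCat, pvMerge, List.getLast?_concat, List.dropLast_concat]
          ring_nf
        · simp [bStep, pvCat, pvMerge, List.getLast?_concat, List.dropLast_concat, hvw, Ne.symm hvw]
    · cases cl with
      | nil => simp [bStep, pvCat, pvMerge, List.getLast?_concat, List.dropLast_concat, huv]
      | cons q t =>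
        obtain ⟨w, d⟩ := q
        by_cases hvw : v = w
        · subst hvw
          simp [bStep, pvCat, pvMerge, List.getLast?_concat, List.dropLast_concat, huv, Ne.symm huv]
          ring
        · simp [bStep, pvCat, pvMerge, List.getLast?_concat, List.dropLast_concat, huv, hvw, Ne.symm huv, Ne.symm hvw]

theorem foldl_bStep_eq (s : List Int) : ∀ acc, s.foldl bStep acc = pvCat acc (pvChunks s) := by
  induction s with
  | nil => intro acc; simp [pvChunks, pvCat]
  | cons v s ih =>
    intro acc
    rw [List.foldl_cons, ih (bStep acc v), pvCat_bStep, pvChunks]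

theorem bRuns_eq_chunks (s : List Int) : bRuns s = pvChunks s := by
  rw [bRuns, foldl_bStep_eq s []]
  cases hc : pvChunks s with
  | nil => rfl
  | cons q t => obtain ⟨u,c⟩ := q; simp [pvCat]

theorem pvM_merge (v w : Int) (cl : List (Int × Int)) :
    pvM (pvMerge v cl) w = (if w = v then 1 else 0) + pvM cl w := by
  cases cl with
  | nil =>
    simp only [pvMerge, pvM]
  | cons q t =>
    obtain ⟨u, c⟩ := q
    by_cases hv : v = u
    · subst hv
      have hm : pvMerge v ((v, c) :: t) = (v, c + 1) :: t := by simp [pvMerge]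
      rw [hm]
      simp only [pvM]
      by_cases hw : w = v <;> simp [hw] <;> try ring
    · have hm : pvMerge v ((u, c) :: t) = (v, 1) :: (u, c) :: t := by simp [pvMerge, hv]
      rw [hm]
      simp only [pvM]

theorem pvM_chunks (s : List Int) (w : Int) : pvM (pvChunks s) w = (s.count w : Int) := by
  induction s with
  | nil => simp [pvChunks, pvM]
  | cons v s ih =>
    rw [pvChunks, pvM_merge, ih, List.count_cons]
    push_cast
    by_cases hw : w = v
    · subst hw; simp; ring
    · simp [hw, Ne.symm hw]

theorem pvChunks_pos_flat (s : List Int) :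
    (∀ q ∈ pvChunks s, 1 ≤ q.2) ∧ pvFlat (pvChunks s) = s := by
  induction s with
  | nil => simp [pvChunks, pvFlat]
  | cons v s ih =>
    obtain ⟨hpos, hflat⟩ := ih
    rw [pvChunks]
    cases hc : pvChunks s with
    | nil =>
      rw [hc] at hflat
      have hs : s = [] := by simpa [pvFlat] using hflat.symm
      subst hs
      simp [pvMerge, pvFlat]
    | cons q t =>
      obtain ⟨u, c⟩ := q
      rw [hc] at hpos hflat
      have hc1 : 1 ≤ c := hpos (u, c) (by simp)
      have hfl2 : List.replicate c.toNat u ++ pvFlat t = s := by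
        simpa [pvFlat] using hflat
      by_cases hv : v = u
      · subst hv
        constructor
        · intro q hq
          rcases List.mem_cons.mp (by simpa [pvMerge] using hq) with rfl | hq'
          · show (1:Int) ≤ c + 1; omega
          · exact hpos q (List.mem_cons_of_mem _ hq')
        · have h2 : (c + 1).toNat = c.toNat + 1 := by omega
          calc pvFlat (pvMerge v ((v, c) :: t))
              = List.replicate (c.toNat + 1) v ++ pvFlat t := by
                simp [pvMerge, pvFlat, h2]
            _ = v :: (List.replicate c.toNat v ++ pvFlat t) := by
                rw [List.replicate_succ]; simp
            _ = v :: s := by rw [hfl2]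
      · constructor
        · intro q hq
          rcases (by simpa [pvMerge, hv] using hq : q = (v, 1) ∨ q = (u, c) ∨ q ∈ t) with rfl | rfl | hq'
          · show (1:Int) ≤ 1; omega
          · exact hpos (u, c) (by simp)
          · exact hpos q (List.mem_cons_of_mem _ hq')
        · calc pvFlat (pvMerge v ((u, c) :: t))
              = v :: (List.replicate c.toNat u ++ pvFlat t) := by
                simp [pvMerge, hv, pvFlat, List.replicate]
            _ = v :: s := by rw [hfl2]

theorem pvChunks_subset (s : List Int) : ∀ q ∈ pvChunks s, q.1 ∈ s := by
  induction s with
  | nil => simp [pvChunks]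
  | cons v s ih =>
    rw [pvChunks]
    cases hc : pvChunks s with
    | nil => simp [pvMerge]
    | cons q t =>
      obtain ⟨u, c⟩ := q
      rw [hc] at ih
      by_cases hv : v = u
      · subst hv
        intro q hq
        rcases List.mem_cons.mp (by simpa [pvMerge] using hq) with rfl | hq'
        · simp
        · exact List.mem_cons_of_mem _ (ih q (List.mem_cons_of_mem _ hq'))
      · intro q hq
        rcases (by simpa [pvMerge, hv] using hq : q = (v, 1) ∨ q = (u, c) ∨ q ∈ t) with rfl | rfl | hq'
        · simp
        · exact List.mem_cons_of_mem _ (ih (u, c) (by simp))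
        · exact List.mem_cons_of_mem _ (ih q (List.mem_cons_of_mem _ hq'))

theorem pvChunks_sorted (s : List Int) (hs : s.Pairwise (· ≤ ·)) :
    (pvChunks s).Pairwise (fun a b => a.1 < b.1) := by
  induction s with
  | nil => simp [pvChunks]
  | cons v s ih =>
    rw [List.pairwise_cons] at hs
    obtain ⟨hle, hs'⟩ := hs
    have ihp := ih hs'
    rw [pvChunks]
    cases hc : pvChunks s with
    | nil => simp [pvMerge]
    | cons q t =>
      obtain ⟨u, c⟩ := q
      rw [hc] at ihp
      have hsub := pvChunks_subset s
      rw [hc] at hsub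
      rw [List.pairwise_cons] at ihp
      obtain ⟨hut, htp⟩ := ihp
      by_cases hv : v = u
      · subst hv
        simp only [pvMerge, if_pos rfl]
        exact List.pairwise_cons.mpr ⟨hut, htp⟩
      · have hvu : v < u := lt_of_le_of_ne (hle u (hsub (u,c) (by simp))) hv
        simp only [pvMerge, if_neg hv]
        refine List.pairwise_cons.mpr ⟨?_, List.pairwise_cons.mpr ⟨hut, htp⟩⟩
        intro q hq
        rcases List.mem_cons.mp hq with rfl | hq'
        · exact hvu
        · exact lt_trans hvu (hut q hq')

theorem pvCover_append (k : Int) (s1 s2 : List (Int × Int)) (w : Int) :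
    pvCover k (s1 ++ s2) w = pvCover k s1 w + pvCover k s2 w := by
  simp [pvCover]

theorem pvBStepLemma (k openc p v c : Int) (starts cs' : List (Int × Int)) (hk : 1 ≤ k)
    (h4 : ∀ q ∈ starts, 0 ≤ q.2 ∧ q.1 ≤ p ∧ p + 1 < q.1 + k)
    (h5 : openc = (starts.map (·.2)).sum)
    (h6 : starts.Pairwise (fun a b => a.1 < b.1))
    (hguard : 0 < openc → (v = p + 1 ∧ openc ≤ c))
    (hpv : p < v) (hc : 0 ≤ c) :
    ∃ openc' starts',
      bLoop k ((v, c) :: cs') openc p starts = bLoop k cs' openc' v starts' ∧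
      (∀ q ∈ starts', 0 ≤ q.2 ∧ q.1 ≤ v ∧ v + 1 < q.1 + k) ∧
      openc' = (starts'.map (·.2)).sum ∧
      starts'.Pairwise (fun a b => a.1 < b.1) ∧
      (∀ w, v < w → pvCover k starts' w = pvCover k starts w + (if w < v + k then c - openc else 0)) := by
  have hng : ¬ (0 < openc ∧ (v ≠ p + 1 ∨ c < openc)) := by
    rintro ⟨hop, hbad⟩
    rcases hguard hop with ⟨he, hle⟩
    rcases hbad with hne | hlt
    · exact hne he
    · omega
  by_cases hop : 0 < openc
  · -- open groups exist: v = p + 1, starts nonempty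
    obtain ⟨he, hle⟩ := hguard hop
    cases starts with
    | nil => simp at h5; omega
    | cons q t =>
      obtain ⟨u, g⟩ := q
      obtain ⟨hg0, hup, hukp⟩ := h4 (u, g) (by simp)
      have hk2 : 1 < k := by omega
      have hstep : bLoop k ((v, c) :: cs') openc p ((u, g) :: t) =
          (if u = v - k + 1 then bLoop k cs' (c - g) v (t ++ [(v, c - openc)])
           else bLoop k cs' c v ((u, g) :: (t ++ [(v, c - openc)]))) := by
        rw [bLoop, if_neg hng]
        simp only [if_pos hop, List.cons_append]
      -- facts about t entries
      have ht4 : ∀ q ∈ t, 0 ≤ q.2 ∧ q.1 ≤ p ∧ p + 1 < q.1 + k :=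
        fun q hq => h4 q (List.mem_cons_of_mem _ hq)
      have htu : ∀ q ∈ t, u < q.1 := fun q hq => (List.pairwise_cons.mp h6).1 q hq
      have ht6 : t.Pairwise (fun a b => a.1 < b.1) := (List.pairwise_cons.mp h6).2
      have hnew4 : (0:Int) ≤ c - openc ∧ v ≤ v ∧ v + 1 < v + k := ⟨by omega, le_refl v, by omega⟩
      by_cases hpop : u = v - k + 1
      · refine ⟨c - g, t ++ [(v, c - openc)], by rw [hstep, if_pos hpop], ?_, ?_, ?_, ?_⟩
        · intro q hq
          rcases List.mem_append.mp hq with hq' | hq'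
          · obtain ⟨ha, hb, hcc⟩ := ht4 q hq'
            have := htu q hq'
            exact ⟨ha, by omega, by omega⟩
          · rcases List.mem_singleton.mp hq' with rfl
            exact hnew4
        · simp only [List.map_append, List.sum_append, List.map_cons, List.sum_cons,
            List.map_nil, List.sum_nil] at h5 ⊢
          simp at h5 ⊢
          omega
        · rw [List.pairwise_append]
          refine ⟨ht6, by simp, ?_⟩
          intro a ha b hb
          rcases List.mem_singleton.mp hb with rfl
          have := (ht4 a ha).2.1
          simp; omega
        · intro w hw
          rw [pvCover_append]
          have hcovt : pvCover k ((u, g) :: t) w = pvCover k t w := by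
            simp only [pvCover, List.map_cons, List.sum_cons]
            have : ¬ (w < u + k) := by omega
            rw [if_neg this]; ring
          have hcov1 : pvCover k [(v, c - openc)] w = (if w < v + k then c - openc else 0) := by
            simp [pvCover]
          rw [hcov1, hcovt]
      · refine ⟨c, (u, g) :: (t ++ [(v, c - openc)]), by rw [hstep, if_neg hpop], ?_, ?_, ?_, ?_⟩
        · intro q hq
          rcases List.mem_cons.mp hq with rfl | hq'
          · exact ⟨hg0, by omega, by omega⟩
          · rcases List.mem_append.mp hq' with hq'' | hq''
            · obtain ⟨ha, hb, hcc⟩ := ht4 q hq''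
              have := htu q hq''
              exact ⟨ha, by omega, by omega⟩
            · rcases List.mem_singleton.mp hq'' with rfl
              exact hnew4
        · simp only [List.map_cons, List.sum_cons, List.map_append, List.sum_append,
            List.map_nil, List.sum_nil] at h5 ⊢
          simp at h5 ⊢
          omega
        · rw [List.pairwise_cons]
          constructor
          · intro q hq
            rcases List.mem_append.mp hq with hq' | hq'
            · exact htu q hq'
            · rcases List.mem_singleton.mp hq' with rfl
              simp; omega
          · rw [List.pairwise_append]
            refine ⟨ht6, by simp, ?_⟩
            intro a ha b hb
            rcases List.mem_singleton.mp hb with rfl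
            have := (ht4 a ha).2.1
            simp; omega
        · intro w hw
          have : pvCover k ((u, g) :: (t ++ [(v, c - openc)])) w
              = pvCover k ((u, g) :: t) w + (if w < v + k then c - openc else 0) := by
            simp only [pvCover, List.map_cons, List.sum_cons, List.map_append, List.sum_append]
            simp [pvCover]
            ring
          rw [this]
  · -- openc = 0
    have hcov0 : ∀ w, pvCover k starts w = 0 := by
      intro w
      have h1 := pvCover_le k starts w (fun q hq => (h4 q hq).1)
      have h2 := pvCover_nonneg k starts w (fun q hq => (h4 q hq).1)
      omega
    have hopz : openc = 0 := by
      have := pvSum_nonneg starts (fun q hq => (h4 q hq).1)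
      omega
    subst hopz
    have hstep : bLoop k ((v, c) :: cs') 0 p starts =
        (if v = v - k + 1 then bLoop k cs' (c - (c - 0)) v []
         else bLoop k cs' c v [(v, c - 0)]) := by
      rw [bLoop, if_neg hng]
      norm_num
    by_cases hk1 : v = v - k + 1
    · have hk1' : k = 1 := by omega
      refine ⟨c - (c - 0), [], by rw [hstep, if_pos hk1], by simp, by simp, by simp, ?_⟩
      intro w hw
      have hnlt : ¬ (w < v + k) := by omega
      rw [hcov0 w]
      simp [pvCover, hnlt]
    · refine ⟨c, [(v, c - 0)], by rw [hstep, if_neg hk1], ?_, by simp, by simp, ?_⟩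
      · intro q hq
        rcases List.mem_singleton.mp hq with rfl
        refine ⟨by omega, le_refl v, by omega⟩
      · intro w hw
        rw [hcov0 w]
        simp [pvCover]

theorem pvCover_all (k : Int) (starts : List (Int × Int)) (w : Int)
    (h : ∀ q ∈ starts, w < q.1 + k) : pvCover k starts w = (starts.map (·.2)).sum := by
  unfold pvCover
  congr 1
  apply List.map_congr_left
  intro q hq
  rw [if_pos (h q hq)]

theorem pvDef (k : Int) (hk : 1 ≤ k) : ∀ (cs : List (Int × Int)) (openc p : Int)
    (starts : List (Int × Int))
    (h4 : ∀ q ∈ starts, 0 ≤ q.2 ∧ q.1 ≤ p ∧ p + 1 < q.1 + k)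
    (h5 : openc = (starts.map (·.2)).sum)
    (h6 : starts.Pairwise (fun a b => a.1 < b.1))
    (h7 : ∀ q ∈ cs, p < q.1 ∧ 1 ≤ q.2)
    (h8 : cs.Pairwise (fun a b => a.1 < b.1))
    (w0 : Int) (hw : p < w0) (hdef : pvM cs w0 < pvCover k starts w0),
    bLoop k cs openc p starts = false := by
  intro cs
  induction cs with
  | nil =>
    intro openc p starts h4 h5 h6 h7 h8 w0 hw hdef
    have hm0 : pvM [] w0 = 0 := rfl
    have hle := pvCover_le k starts w0 (fun q hq => (h4 q hq).1)
    have hop : 0 < openc := by omega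
    simp [bLoop]
    omega
  | cons q cs' ih =>
    obtain ⟨v, c⟩ := q
    intro openc p starts h4 h5 h6 h7 h8 w0 hw hdef
    obtain ⟨hpv, hc1⟩ := h7 (v, c) (by simp)
    have hrest : ∀ q ∈ cs', v < q.1 := fun q hq => (List.pairwise_cons.mp h8).1 q hq
    by_cases hbad : 0 < openc ∧ (v ≠ p + 1 ∨ c < openc)
    · rw [bLoop, if_pos hbad]
    · have hguard : 0 < openc → (v = p + 1 ∧ openc ≤ c) := by
        push_neg at hbad
        intro hop
        rcases hbad hop with ⟨he, hle⟩
        exact ⟨he, hle⟩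
      have hopnn : 0 ≤ openc := h5 ▸ pvSum_nonneg starts (fun q hq => (h4 q hq).1)
      have hcovle := pvCover_le k starts w0 (fun q hq => (h4 q hq).1)
      -- w0 cannot be < v
      have hwv : v < w0 := by
        rcases lt_trichotomy w0 v with hlt | heq | hgt
        · exfalso
          have hm0 : pvM ((v, c) :: cs') w0 = 0 := by
            apply pvM_eq_zero
            intro q hq
            rcases List.mem_cons.mp hq with rfl | hq'
            · omega
            · have := hrest q hq'; omega
          have hop : 0 < openc := by omega
          obtain ⟨he, _⟩ := hguard hop
          omega
        · exfalso
          subst heq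
          have hm : pvM ((w0, c) :: cs') w0 = c := by
            have h0 : pvM cs' w0 = 0 := by
              apply pvM_eq_zero
              intro q hq
              have := hrest q hq; omega
            simp [pvM, h0]
          rcases (em (0 < openc)) with hop | hop
          · obtain ⟨_, hle⟩ := hguard hop
            omega
          · omega
        · exact hgt
      obtain ⟨openc', starts', heq, h4', h5', h6', hcov'⟩ :=
        pvBStepLemma k openc p v c starts cs' hk h4 h5 h6 hguard hpv (by omega)
      rw [heq]
      apply ih openc' v starts' h4' h5' h6'
        (fun q hq => ⟨hrest q hq, (h7 q (List.mem_cons_of_mem _ hq)).2⟩)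
        (List.pairwise_cons.mp h8).2 w0 hwv
      have hm : pvM ((v, c) :: cs') w0 = pvM cs' w0 := by
        simp [pvM, show w0 ≠ v by omega]
      have hco : 0 ≤ c - openc := by
        rcases (em (0 < openc)) with hop | hop
        · have := (hguard hop).2; omega
        · omega
      have := hcov' w0 hwv
      by_cases hwk : w0 < v + k
      · rw [this, if_pos hwk]
        omega
      · rw [this, if_neg hwk]
        omega

theorem pvMain (k : Int) (hk : 1 ≤ k) : ∀ (cs : List (Int × Int)) (f : Int → Int)
    (openc p : Int) (starts : List (Int × Int)) (hInv : pvInv k f openc p starts cs),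
    pvALoop k (pvFlat cs) f = bLoop k cs openc p starts := by
  intro cs
  induction cs with
  | nil =>
    intro f openc p starts hInv
    obtain ⟨h2, h3, h4, h5, h6, h7, h8⟩ := hInv
    have hopnn : 0 ≤ openc := h5 ▸ pvSum_nonneg starts (fun q hq => (h4 q hq).1)
    have hop0 : openc = 0 := by
      by_contra hne
      have hop : 0 < openc := by omega
      have hcall : pvCover k starts (p + 1) = (starts.map (·.2)).sum :=
        pvCover_all k starts (p + 1) (fun q hq => (h4 q hq).2.2)
      have hf := h2 (p + 1) (by omega)
      have hf3 := h3 (p + 1) (by omega)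
      have : pvM [] (p + 1) = 0 := rfl
      omega
    subst hop0
    simp [pvFlat, pvALoop, bLoop]
  | cons q cs' ih =>
    obtain ⟨v, c⟩ := q
    intro f openc p starts hInv
    obtain ⟨h2, h3, h4, h5, h6, h7, h8⟩ := hInv
    obtain ⟨hpv, hc1⟩ := h7 (v, c) (by simp)
    have hrest : ∀ q ∈ cs', v < q.1 := fun q hq => (List.pairwise_cons.mp h8).1 q hq
    have hopnn : 0 ≤ openc := h5 ▸ pvSum_nonneg starts (fun q hq => (h4 q hq).1)
    have hMrest0 : pvM cs' v = 0 := by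
      apply pvM_eq_zero; intro q hq; have := hrest q hq; omega
    have hMv : pvM ((v, c) :: cs') v = c := by simp [pvM, hMrest0]
    -- v = p + 1 when open groups exist
    have hvp : 0 < openc → v = p + 1 := by
      intro hop
      have hcall : pvCover k starts (p + 1) = (starts.map (·.2)).sum :=
        pvCover_all k starts (p + 1) (fun q hq => (h4 q hq).2.2)
      have hf := h2 (p + 1) (by omega)
      have hf3 := h3 (p + 1) (by omega)
      have hMne : pvM ((v, c) :: cs') (p + 1) ≠ 0 := by omega
      obtain ⟨q, hq, hqe⟩ := pvM_ne_zero _ _ hMne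
      rcases List.mem_cons.mp hq with rfl | hq'
      · omega
      · have := hrest q hq'; omega
    have hcov_v : pvCover k starts v = openc := by
      rcases (em (0 < openc)) with hop | hop
      · have he := hvp hop
        subst he
        exact (pvCover_all k starts (p + 1) (fun q hq => (h4 q hq).2.2)).trans h5.symm
      · have h1 := pvCover_le k starts v (fun q hq => (h4 q hq).1)
        have h2' := pvCover_nonneg k starts v (fun q hq => (h4 q hq).1)
        omega
    have hfv : f v = c - openc := by
      have := h2 v hpv
      omega
    have hfvnn : 0 ≤ f v := h3 v hpv
    have hguard : 0 < openc → (v = p + 1 ∧ openc ≤ c) := fun hop => ⟨hvp hop, by omega⟩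
    obtain ⟨openc', starts', heq, h4', h5', h6', hcov'⟩ :=
      pvBStepLemma k openc p v c starts cs' hk h4 h5 h6 hguard hpv (by omega)
    rw [heq]
    -- A side: block of c copies of v
    have hflat : pvFlat ((v, c) :: cs') = List.replicate c.toNat v ++ pvFlat cs' := by
      simp [pvFlat]
    have h0win : ∀ w ∈ PySem.List.pyRange v (v + k), 0 ≤ f w := by
      intro w hw
      have := PySem.List.mem_pyRange_one.mp hw
      exact h3 w (by omega)
    have hfvle : f v ≤ (c.toNat : Int) := by
      rw [Int.toNat_of_nonneg (by omega)]
      omega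
    rw [hflat, pvBlock k v hk c.toNat f (pvFlat cs') h0win hfvle]
    by_cases hex : ∃ w ∈ PySem.List.pyRange v (v + k), f w < f v
    · rw [if_pos hex]
      obtain ⟨w0, hw0mem, hw0lt⟩ := hex
      obtain ⟨hw0a, hw0b⟩ := PySem.List.mem_pyRange_one.mp hw0mem
      have hw0v : v < w0 := by
        rcases eq_or_lt_of_le hw0a with rfl | h
        · omega
        · exact h
      symm
      apply pvDef k hk cs' openc' v starts' h4' h5' h6'
        (fun q hq => ⟨hrest q hq, (h7 q (List.mem_cons_of_mem _ hq)).2⟩)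
        (List.pairwise_cons.mp h8).2 w0 hw0v
      have hfw0 := h2 w0 (by omega)
      have hm : pvM ((v, c) :: cs') w0 = pvM cs' w0 := by
        simp [pvM, show w0 ≠ v by omega]
      have := hcov' w0 hw0v
      rw [this, if_pos (by omega)]
      omega
    · rw [if_neg hex]
      apply ih _ openc' v starts'
      push_neg at hex
      refine ⟨?_, ?_, h4', h5', h6',
        fun q hq => ⟨hrest q hq, (h7 q (List.mem_cons_of_mem _ hq)).2⟩,
        (List.pairwise_cons.mp h8).2⟩
      · intro w hwv
        have hcw := hcov' w hwv
        have hfw := h2 w (by omega)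
        have hm : pvM ((v, c) :: cs') w = pvM cs' w := by
          simp [pvM, show w ≠ v by omega]
        by_cases hwin : w ∈ PySem.List.pyRange v (v + k)
        · have hb := PySem.List.mem_pyRange_one.mp hwin
          simp only [hwin, if_true]
          rw [hcw, if_pos (by omega)]
          omega
        · have hb : ¬ (w < v + k) := by
            intro hlt
            exact hwin (PySem.List.mem_pyRange_one.mpr ⟨by omega, hlt⟩)
          simp only [hwin, if_false]
          rw [hcw, if_neg hb]
          omega
      · intro w hwv
        by_cases hwin : w ∈ PySem.List.pyRange v (v + k)
        · simp only [hwin, if_true]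
          have := hex w hwin
          omega
        · simp only [hwin, if_false]
          exact h3 w (by omega)

theorem bLoop_prev_irrel (k : Int) (cs : List (Int × Int)) (p p' : Int) :
    bLoop k cs 0 p [] = bLoop k cs 0 p' [] := by
  cases cs with
  | nil => rfl
  | cons q rest =>
    obtain ⟨v, c⟩ := q
    rw [bLoop, bLoop]
    rw [if_neg (show ¬(0 < (0:Int) ∧ (v ≠ p + 1 ∨ c < 0)) by rintro ⟨h, _⟩; exact lt_irrefl 0 h)]
    rw [if_neg (show ¬(0 < (0:Int) ∧ (v ≠ p' + 1 ∨ c < 0)) by rintro ⟨h, _⟩; exact lt_irrefl 0 h)]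

theorem validgroup_agrees (arr : List Int) (k : Int) (hpre : Pre_validgroup arr k) :
    validgroup arr k = validgroup_alt arr k := by
  have hk : 1 ≤ k := hpre
  unfold validgroup validgroup_alt
  by_cases hm : PySem.Int.mod (arr.length : Int) k ≠ 0
  · rw [if_pos hm, if_pos hm]
  · rw [if_neg hm, if_neg hm]
    show vgOuter k (PySem.List.sorted arr (fun x => x))
        (PySem.Dict.counter (PySem.List.sorted arr (fun x => x))) = _
    set s := PySem.List.sorted arr (fun x => x) with hsdef
    rw [vgOuter_eq]
    have hcnt : (fun w => (PySem.Dict.counter s).getD w 0) = (fun w => (s.count w : Int)) :=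
      funext fun w => PySem.Dict.getD_counter s w
    rw [hcnt]
    obtain ⟨hpos, hflat⟩ := pvChunks_pos_flat s
    have hsp : s.Pairwise (· ≤ ·) := PySem.List.sorted_pairwise arr (fun x => x)
    have h8 := pvChunks_sorted s hsp
    have hp0 : ∀ q ∈ pvChunks s, ((pvChunks s).map (·.1)).foldl min 0 - 1 < q.1 := by
      intro q hq
      have hmem : q.1 ∈ (pvChunks s).map (·.1) := List.mem_map_of_mem hq
      have := (PySem.List.foldl_min_le ((pvChunks s).map (·.1)) 0).2 q.1 hmem
      omega
    have hmain := pvMain k hk (pvChunks s) (fun w => (s.count w : Int)) 0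
        (((pvChunks s).map (·.1)).foldl min 0 - 1) []
        ⟨by intro w _; simp [pvM_chunks, pvCover],
         by intro w _; positivity,
         by intro q hq; simp at hq,
         by simp,
         by simp,
         fun q hq => ⟨hp0 q hq, hpos q hq⟩,
         h8⟩
    calc pvALoop k s (fun w => (s.count w : Int))
        = pvALoop k (pvFlat (pvChunks s)) (fun w => (s.count w : Int)) := by rw [hflat]
      _ = bLoop k (pvChunks s) 0 (((pvChunks s).map (·.1)).foldl min 0 - 1) [] := hmain
      _ = bLoop k (pvChunks s) 0 0 [] := bLoop_prev_irrel ..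
      _ = bLoop k (bRuns s) 0 0 [] := by rw [bRuns_eq_chunks]

-- ===== VERDICT (by name: the statement is the Claim_ definition above) =====
theorem validgroup_spec : Claim_equal_validgroup := by
  intro arr k _hdom hpre
  exact validgroup_agrees arr k hpre
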